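-- pv_equiv track=rewrite | github.com/wongcheehong/ngau-evaluator | ngau.py | checkNgau
-- ===== SOURCE A (Python) =====
-- point = {
--     'A' : 1,
--     '1' : 1,
--     '2' : 2,
--     '3' : [3,6],
--     '4' : 4,
--     '5' : 5,
--     '6' : [6,3],
--     '7' : 7,
--     '8' : 8,
--     '9' : 9,
--     '10': 10,
--     'J' : 10,
--     'Q' : 10,
--     'K' : 10,
-- }
--
-- def checkNgau(three_card_combination):
--     score = 0
--     numOf36 = 0
--     for i in three_card_combination:
--         try:
--             score += point[i]
--         except TypeError:
--            numOf36 += 1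
--
--     if numOf36 == 0:
--         if score % 10 == 0:
--             return True
--         else:
--             return False
--     elif numOf36 == 1:
--         possible_score = [3, 6]
--     elif numOf36 == 2:
--         possible_score = [6, 9, 12]
--     else:
--         return False
--
--     for i in possible_score:
--         score += i
--         if score % 10 == 0:
--             return True
--         else:
--             score -= i
--     return False
-- ===== SOURCE B (Python) =====
-- POINT = {
--     'A': 1, '1': 1, '2': 2, '4': 4, '5': 5, '7': 7,
--     '8': 8, '9': 9, '10': 10, 'J': 10, 'Q': 10, 'K': 10,
-- }
--
-- def checkNgau(three_card_combination):
--     # Recursive dynamic programming over the hand: carry the SET of totals the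
--     # cards seen so far can add up to ('3'/'6' branches into both readings),
--     # stopping with False as soon as a third flexible card appears (such a hand
--     # never scores); at the end test whether any achievable total is a multiple of 10.
--     def go(cards, totals, flex):
--         if not cards:
--             return any(t % 10 == 0 for t in totals)
--         c, *rest = cards
--         if c in ('3', '6'):
--             if flex == 2:
--                 return False
--             return go(rest, {t + d for t in totals for d in (3, 6)}, flex + 1)
--         return go(rest, {t + POINT[c] for t in totals}, flex)
--     return go(list(three_card_combination), {0}, 0)
-- ===== Notes on version B (the rewrite author's own statement) =====
-- stated objective: alternative
-- what changed: Replaces A's TypeError-catching score accumulator plus hard-coded possible_score tables and the add-check-subtract probe loop by a recursive dynamic programming pass that carries the set of achievable totals (branching each '3'/'6' into both readings) and tests divisibility by 10 once at the end.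
import Mathlib
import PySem

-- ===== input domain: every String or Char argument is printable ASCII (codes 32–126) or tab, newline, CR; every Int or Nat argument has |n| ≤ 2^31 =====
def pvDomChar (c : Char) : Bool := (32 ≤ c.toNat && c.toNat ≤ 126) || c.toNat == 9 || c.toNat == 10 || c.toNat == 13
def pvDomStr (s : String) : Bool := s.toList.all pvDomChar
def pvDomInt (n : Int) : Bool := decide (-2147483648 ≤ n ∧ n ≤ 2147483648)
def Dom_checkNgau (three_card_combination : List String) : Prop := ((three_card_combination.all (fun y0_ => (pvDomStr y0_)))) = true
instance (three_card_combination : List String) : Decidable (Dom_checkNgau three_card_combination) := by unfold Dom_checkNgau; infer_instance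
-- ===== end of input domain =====

-- B replaces A's TypeError-catching accumulator plus hard-coded possible_score tables and probe loop
-- by a recursive DP that carries the set of achievable totals, branching each '3'/'6' (alternative).


-- ===== PORT A =====
-- the module dict 'point': values are an int (.inl) or the list [x,y] for '3'/'6' (.inr);
-- lookup transliterated as the key-equality chain of the dict literal (exact); none = KeyError
def pointA (c : String) : Option (Int ⊕ (Int × Int)) :=
  if c = "A" then some (.inl 1)
  else if c = "1" then some (.inl 1)
  else if c = "2" then some (.inl 2)
  else if c = "3" then some (.inr (3, 6))
  else if c = "4" then some (.inl 4)
  else if c = "5" then some (.inl 5)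
  else if c = "6" then some (.inr (6, 3))
  else if c = "7" then some (.inl 7)
  else if c = "8" then some (.inl 8)
  else if c = "9" then some (.inl 9)
  else if c = "10" then some (.inl 10)
  else if c = "J" then some (.inl 10)
  else if c = "Q" then some (.inl 10)
  else if c = "K" then some (.inl 10)
  else none

-- one iteration of A's for-loop: 'score += point[i]' succeeds on an int,
-- raises TypeError on a list (→ numOf36 += 1), KeyError (none) on a missing key
def stepA (st : Option (Int × Int)) (c : String) : Option (Int × Int) :=
  match st with
  | none => none
  | some (score, numOf36) =>
    match pointA c with
    | none => none
    | some (.inl v) => some (score + v, numOf36)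
    | some (.inr _) => some (score, numOf36 + 1)

-- A's second loop: score += i; test; score -= i
def possLoopA (score : Int) : List Int → Bool
  | [] => false
  | i :: rest =>
    let score' := score + i
    if PySem.Int.mod score' 10 = 0 then true else possLoopA (score' - i) rest

-- A's dispatch after the for-loop (the if/elif chain on numOf36)
def finishA (score numOf36 : Int) : Bool :=
  if numOf36 = 0 then decide (PySem.Int.mod score 10 = 0)
  else if numOf36 = 1 then possLoopA score [3, 6]
  else if numOf36 = 2 then possLoopA score [6, 9, 12]
  else false

def checkNgau (three_card_combination : List String) : Bool :=
  match three_card_combination.foldl stepA (some (0, 0)) with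
  | none => false   -- KeyError: unreachable under Pre_
  | some (score, numOf36) => finishA score numOf36

-- ===== PORT B =====
-- Source B's POINT dict (non-flexible cards only), same key-equality-chain transliteration
def pointB (c : String) : Option Int :=
  if c = "A" then some 1
  else if c = "1" then some 1
  else if c = "2" then some 2
  else if c = "4" then some 4
  else if c = "5" then some 5
  else if c = "7" then some 7
  else if c = "8" then some 8
  else if c = "9" then some 9
  else if c = "10" then some 10
  else if c = "J" then some 10
  else if c = "Q" then some 10
  else if c = "K" then some 10
  else none

-- Source B's inner recursion 'go': totals is a Python set (PySem.Set Int); none = KeyError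
def goB : List String → PySem.Set Int → Int → Option Bool
  | [], totals, _ => some (totals.any (fun t => PySem.Int.mod t 10 == 0))
  | c :: rest, totals, flex =>
    if c = "3" ∨ c = "6" then
      if flex = 2 then some false
      else goB rest (PySem.Set.ofList (totals.flatMap (fun t => [t + 3, t + 6]))) (flex + 1)
    else
      match pointB c with
      | none => none   -- KeyError, as in Source B
      | some v => goB rest (PySem.Set.ofList (totals.map (fun t => t + v))) flex

def checkNgau_alt (three_card_combination : List String) : Bool :=
  (goB three_card_combination (PySem.Set.ofList [0]) 0).getD false   -- none (KeyError) unreachable under Pre_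

-- ===== PRECONDITION & SPEC =====
-- Pre_ excludes exactly the inputs on which the Python A raises KeyError (a card that is
-- not a key of the point dict); B's Python raises KeyError there too (or has already returned False).
def Pre_checkNgau (three_card_combination : List String) : Prop :=
  ∀ c ∈ three_card_combination,
    c ∈ ["A", "1", "2", "3", "4", "5", "6", "7", "8", "9", "10", "J", "Q", "K"]
instance (three_card_combination : List String) : Decidable (Pre_checkNgau three_card_combination) := by unfold Pre_checkNgau; infer_instance

def pvWitness_checkNgau : List String := ["3", "A", "6"]

def Spec_checkNgau (three_card_combination : List String) (out : Bool) : Prop := out = checkNgau_alt three_card_combination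
instance (three_card_combination : List String) (out : Bool) : Decidable (Spec_checkNgau three_card_combination out) := by unfold Spec_checkNgau; infer_instance

-- ===== CLAIM (what is proved, stated in full; the proofs are below) =====
def Claim_equal_checkNgau : Prop := ∀ (three_card_combination : List String), Dom_checkNgau three_card_combination → Pre_checkNgau three_card_combination → Spec_checkNgau three_card_combination (checkNgau three_card_combination)

-- ===== LEMMAS AND PROOFS =====

-- the totals set B carries, as a function of A's running (score, numOf36)
def tsList (s : Int) (n : Int) : List Int :=
  if n = 0 then [s] else if n = 1 then [s + 3, s + 6] else [s + 6, s + 9, s + 12]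

theorem ofList_pair (a b : Int) (h : a ≠ b) : PySem.Set.ofList [a, b] = [a, b] := by
  simp [PySem.Set.ofList, PySem.Set.add, PySem.Set.contains, List.foldl, Ne.symm h]

theorem ofList_triple (a b c : Int) (hab : a ≠ b) (hac : a ≠ c) (hbc : b ≠ c) :
    PySem.Set.ofList [a, b, c] = [a, b, c] := by
  simp [PySem.Set.ofList, PySem.Set.add, PySem.Set.contains, List.foldl,
    Ne.symm hab, Ne.symm hac, Ne.symm hbc]

theorem ofList_abbc (a b c : Int) (hab : a ≠ b) (hac : a ≠ c) (hbc : b ≠ c) :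
    PySem.Set.ofList [a, b, b, c] = [a, b, c] := by
  simp [PySem.Set.ofList, PySem.Set.add, PySem.Set.contains, List.foldl,
    Ne.symm hab, Ne.symm hac, Ne.symm hbc]

-- folding from a raised state stays raised
theorem foldA_none (l : List String) : l.foldl stepA none = none := by
  induction l with
  | nil => rfl
  | cons c r ih => simpa [List.foldl, stepA] using ih

-- A's fold either raises, or returns with numOf36 not decreased
theorem foldA_mono (cards : List String) :
    ∀ s n : Int, (∃ s' k : Int, cards.foldl stepA (some (s, n)) = some (s', n + k) ∧ 0 ≤ k) ∨
      cards.foldl stepA (some (s, n)) = none := by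
  induction cards with
  | nil => intro s n; exact Or.inl ⟨s, 0, by simp, le_refl 0⟩
  | cons c rest ih =>
    intro s n
    rw [List.foldl_cons]
    rcases h : stepA (some (s, n)) c with _ | ⟨s₁, n₁⟩
    · exact Or.inr (foldA_none rest)
    · have hn : n₁ = n ∨ n₁ = n + 1 := by
        simp only [stepA] at h
        rcases hp : pointA c with _ | (v | v) <;> simp [hp] at h <;> omega
      rcases ih s₁ n₁ with ⟨s', k, h1, h2⟩ | h1
      · refine Or.inl ?_
        rcases hn with rfl | rfl
        · exact ⟨s', k, h1, h2⟩
        · exact ⟨s', k + 1, by rw [h1, show n + 1 + k = n + (k + 1) from by ring], by omega⟩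
      · exact Or.inr h1

-- the endgame: B's any-over-totals equals A's dispatch, for n ∈ {0,1,2}
theorem finish_eq (s n : Int) (hn : n = 0 ∨ n = 1 ∨ n = 2) :
    ((tsList s n).any (fun t => PySem.Int.mod t 10 == 0)) = finishA s n := by
  rcases hn with rfl | rfl | rfl <;>
    · rw [Bool.eq_iff_iff]
      simp [tsList, finishA, possLoopA]
      try tauto

-- main invariant: B's recursion tracks A's fold through the totals set tsList
theorem main_inv (cards : List String)
    (hvalid : ∀ c ∈ cards,
      c ∈ ["A", "1", "2", "3", "4", "5", "6", "7", "8", "9", "10", "J", "Q", "K"]) :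
    ∀ s n : Int, n = 0 ∨ n = 1 ∨ n = 2 →
      ∃ s' n' : Int, cards.foldl stepA (some (s, n)) = some (s', n') ∧
        goB cards (tsList s n) n = some (finishA s' n') := by
  induction cards with
  | nil =>
    intro s n hn
    exact ⟨s, n, by simp, by simpa [goB] using congrArg some (finish_eq s n hn)⟩
  | cons c rest ih =>
    intro s n hn
    have hrest : ∀ x ∈ rest, x ∈ ["A", "1", "2", "3", "4", "5", "6", "7", "8", "9", "10", "J", "Q", "K"] :=
      fun x hx => hvalid x (List.mem_cons_of_mem _ hx)
    have hc := hvalid c List.mem_cons_self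
    -- the generic non-flexible step
    have nonflex : ∀ v : Int, pointA c = some (.inl v) → pointB c = some v → ¬ (c = "3" ∨ c = "6") →
        ∃ s' n' : Int, (c :: rest).foldl stepA (some (s, n)) = some (s', n') ∧
          goB (c :: rest) (tsList s n) n = some (finishA s' n') := by
      intro v hA hB hflex
      have hstep : stepA (some (s, n)) c = some (s + v, n) := by simp [stepA, hA]
      have hmap : PySem.Set.ofList ((tsList s n).map (fun t => t + v)) = tsList (s + v) n := by
        rcases hn with rfl | rfl | rfl
        · simp [tsList, PySem.Set.ofList, PySem.Set.add, PySem.Set.contains]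
        · have e : (tsList s 1).map (fun t => t + v) = [s + 3 + v, s + 6 + v] := by simp [tsList]
          rw [e, ofList_pair _ _ (by omega)]
          simp [tsList] <;> omega
        · have e : (tsList s 2).map (fun t => t + v) = [s + 6 + v, s + 9 + v, s + 12 + v] := by
            simp [tsList]
          rw [e, ofList_triple _ _ _ (by omega) (by omega) (by omega)]
          simp [tsList] <;> omega
      obtain ⟨s', n', h1, h2⟩ := ih hrest (s + v) n hn
      refine ⟨s', n', ?_, ?_⟩
      · simpa [List.foldl, hstep] using h1
      · simpa [goB, hflex, hB, hmap] using h2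
    -- the flexible step ('3' or '6')
    have flex : (c = "3" ∨ c = "6") →
        ∃ s' n' : Int, (c :: rest).foldl stepA (some (s, n)) = some (s', n') ∧
          goB (c :: rest) (tsList s n) n = some (finishA s' n') := by
      intro hflex
      have hstep : stepA (some (s, n)) c = some (s, n + 1) := by
        rcases hflex with rfl | rfl <;> simp [stepA, pointA]
      rcases hn with rfl | rfl | rfl
      · -- n = 0 → 1
        have hset : PySem.Set.ofList ((tsList s 0).flatMap (fun t => [t + 3, t + 6])) = tsList s 1 := by
          have e : (tsList s 0).flatMap (fun t => [t + 3, t + 6]) = [s + 3, s + 6] := by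
            simp [tsList]
          rw [e, ofList_pair _ _ (by omega)]
          simp [tsList]
        obtain ⟨s', n', h1, h2⟩ := ih hrest s 1 (by norm_num)
        exact ⟨s', n', by simpa [List.foldl, hstep] using h1,
          by simpa [goB, hflex, hset] using h2⟩
      · -- n = 1 → 2
        have hset : PySem.Set.ofList ((tsList s 1).flatMap (fun t => [t + 3, t + 6])) = tsList s 2 := by
          have e : (tsList s 1).flatMap (fun t => [t + 3, t + 6]) = [s + 6, s + 9, s + 9, s + 12] := by
            simp [tsList] <;> omega
          rw [e, ofList_abbc _ _ _ (by omega) (by omega) (by omega)]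
          simp [tsList]
        obtain ⟨s', n', h1, h2⟩ := ih hrest s 2 (by norm_num)
        exact ⟨s', n', by simpa [List.foldl, hstep] using h1,
          by simpa [goB, hflex, hset] using h2⟩
      · -- n = 2: B returns False; A's numOf36 ends ≥ 3 (or KeyError — impossible on valid cards)
        have hvalid_fold : ∀ (l : List String), (∀ x ∈ l, x ∈ ["A", "1", "2", "3", "4", "5", "6", "7", "8", "9", "10", "J", "Q", "K"]) →
            ∀ a b : Int, l.foldl stepA (some (a, b)) ≠ none := by
          intro l
          induction l with
          | nil => intro _ a b; simp
          | cons x xs ihl =>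
            intro hv a b
            have hx := hv x List.mem_cons_self
            have hxs := fun y hy => hv y (List.mem_cons_of_mem _ hy)
            have hx' : pointA x ≠ none := by fin_cases hx <;> simp [pointA]
            rw [List.foldl_cons]
            rcases hp : pointA x with _ | (v | v)
            · exact absurd hp hx'
            · simpa [stepA, hp] using ihl hxs (a + v) b
            · simpa [stepA, hp] using ihl hxs a (b + 1)
        rcases foldA_mono rest s 3 with ⟨s', k, h1, h2⟩ | h1
        · refine ⟨s', 3 + k, by simpa [List.foldl, hstep] using h1, ?_⟩
          have : finishA s' (3 + k) = false := by
            simp [finishA, show ¬(3 + k = 0) by omega, show ¬(3 + k = 1) by omega,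
              show ¬(3 + k = 2) by omega]
          simp [goB, hflex, this]
        · exact absurd h1 (hvalid_fold rest hrest s 3)
    by_cases hflex : c = "3" ∨ c = "6"
    · exact flex hflex
    · fin_cases hc <;> first
        | exact absurd (Or.inl rfl) hflex
        | exact absurd (Or.inr rfl) hflex
        | exact nonflex _ rfl rfl hflex

-- ===== VERDICT (by name: the statement is the Claim_ definition above) =====
theorem checkNgau_spec : Claim_equal_checkNgau := by
  intro xs _ hpre
  unfold Spec_checkNgau checkNgau checkNgau_alt
  obtain ⟨s', n', h1, h2⟩ := main_inv xs hpre 0 0 (Or.inl rfl)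
  rw [h1, show PySem.Set.ofList [(0:Int)] = tsList 0 0 by rfl, h2]
  rfl
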